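-- pv_equiv track=rewrite | github.com/xueyufeizhang/sc-refine | src/approaches.py | detect_duplicate_options
-- ===== SOURCE A (Python) =====
-- def detect_duplicate_options(options: list) -> list:
--     """
--     Detect duplicate or nearly identical options
--
--     Returns:
--         list of tuples: [(idx1, idx2, "identical"), ...]
--     """
--     labels = ["A", "B", "C", "D"]
--     duplicates = []
--
--     for i in range(len(options)):
--         for j in range(i + 1, len(options)):
--             # Standardize comparison: strip and lowercase
--             opt_i = options[i].strip().lower()
--             opt_j = options[j].strip().lower()
--
--             if opt_i == opt_j:
--                 duplicates.append((labels[i], labels[j], "identical"))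
--             # More similarity detection logic can be added here
--
--     return duplicates
-- ===== SOURCE B (Python) =====
-- def _pairs(idxs):
--     """All ordered pairs (idxs[p], idxs[q]) with p < q, recursively."""
--     if not idxs:
--         return []
--     first, rest = idxs[0], idxs[1:]
--     return [(first, b) for b in rest] + _pairs(rest)
--
--
-- def detect_duplicate_options(options: list) -> list:
--     labels = ["A", "B", "C", "D"]
--     # one pass: group the option indices by their normalized text
--     groups = {}
--     for k, opt in enumerate(options):
--         key = opt.strip().lower()
--         groups[key] = groups.get(key, []) + [k]
--     # emit every pair inside each group, groups in first-occurrence order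
--     duplicates = []
--     for idxs in groups.values():
--         for a, b in _pairs(idxs):
--             duplicates.append((labels[a], labels[b], "identical"))
--     return duplicates
-- ===== Notes on version B (the rewrite author's own statement) =====
-- stated objective: faster
-- what changed: Replaces A's nested all-pairs loop (which re-normalizes both strings for every pair) by a single pass that groups option indices in a dict keyed by the normalized text, then emits the pairs of each group in first-occurrence order.
import Mathlib
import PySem

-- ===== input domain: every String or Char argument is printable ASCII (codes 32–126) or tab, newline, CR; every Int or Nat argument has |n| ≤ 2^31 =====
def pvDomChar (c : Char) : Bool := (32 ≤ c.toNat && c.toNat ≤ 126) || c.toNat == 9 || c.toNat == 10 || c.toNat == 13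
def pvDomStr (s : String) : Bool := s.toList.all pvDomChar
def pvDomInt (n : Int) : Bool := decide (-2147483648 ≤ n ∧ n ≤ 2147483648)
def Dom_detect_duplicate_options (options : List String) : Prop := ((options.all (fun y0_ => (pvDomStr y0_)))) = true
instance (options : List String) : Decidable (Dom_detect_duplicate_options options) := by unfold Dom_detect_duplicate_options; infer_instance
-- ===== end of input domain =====

set_option maxHeartbeats 1000000


-- B replaces A's quadratic all-pairs scan by a single grouping pass (a dict from
-- normalized option text to the list of indices) followed by per-group pair emission.

-- normalized option text: opt.strip().lower()
def pvNorm (s : String) : String := PySem.Str.lower (PySem.Str.strip s)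

-- ===== PORT A =====
def detect_duplicate_options (options : List String) : List (String × String × String) :=
  let labels := ["A", "B", "C", "D"]
  (PySem.List.pyRange 0 (options.length : Int) 1).foldl (fun duplicates i =>
    (PySem.List.pyRange (i + 1) (options.length : Int) 1).foldl (fun duplicates j =>
      let opt_i := pvNorm (PySem.List.pyGetD options i "")
      let opt_j := pvNorm (PySem.List.pyGetD options j "")
      if opt_i == opt_j then
        duplicates ++ [(PySem.List.pyGetD labels i "", PySem.List.pyGetD labels j "", "identical")]
      else duplicates) duplicates) []

-- ===== PORT B =====
-- _pairs(idxs): all (idxs[p], idxs[q]) with p < q, recursively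
def pvPairs : List Int → List (Int × Int)
  | [] => []
  | first :: rest => rest.map (fun b => (first, b)) ++ pvPairs rest

def detect_duplicate_options_alt (options : List String) : List (String × String × String) :=
  let labels := ["A", "B", "C", "D"]
  let groups := (PySem.List.enumerate options 0).foldl
      (fun d p => d.modify (pvNorm p.2) [] (fun l => l ++ [p.1])) PySem.Dict.empty
  groups.values.foldl (fun duplicates idxs =>
    (pvPairs idxs).foldl (fun duplicates ab =>
      duplicates ++ [(PySem.List.pyGetD labels ab.1 "", PySem.List.pyGetD labels ab.2 "", "identical")]) duplicates) []

-- ===== PRECONDITION & SPEC =====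
-- A raises IndexError (labels has only 4 entries) whenever two options with equal
-- normalized text meet at an index ≥ 4; Pre_ excludes exactly those inputs.
def Pre_detect_duplicate_options (options : List String) : Prop :=
  ∀ j, j < options.length → ∀ i, i < j →
    pvNorm (options.getD i "") = pvNorm (options.getD j "") → j < 4
instance (options : List String) : Decidable (Pre_detect_duplicate_options options) := by
  unfold Pre_detect_duplicate_options; infer_instance

def pvWitness_detect_duplicate_options : List String := ["a", "b", " A ", "c", "xyz"]

def Spec_detect_duplicate_options (options : List String) (out : List (String × String × String)) : Prop := out = detect_duplicate_options_alt options
instance (options : List String) (out : List (String × String × String)) : Decidable (Spec_detect_duplicate_options options out) := by unfold Spec_detect_duplicate_options; infer_instance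

-- ===== CLAIM (what is proved, stated in full; the proofs are below) =====
def Claim_equal_detect_duplicate_options : Prop := ∀ (options : List String), Dom_detect_duplicate_options options → Pre_detect_duplicate_options options → Spec_detect_duplicate_options options (detect_duplicate_options options)

-- ===== LEMMAS AND PROOFS =====

-- the output entry (labels[i], labels[j], "identical") for an index pair
def pvF : Int × Int → String × String × String :=
  fun ab => (PySem.List.pyGetD ["A", "B", "C", "D"] ab.1 "",
             PySem.List.pyGetD ["A", "B", "C", "D"] ab.2 "", "identical")

-- A's pair stream over a key list: lexicographic (i, j) with equal keys
def pvCoreL (ks : List String) : List (Int × Int) :=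
  (PySem.List.pyRange 0 (ks.length : Int) 1).flatMap (fun i =>
    ((PySem.List.pyRange (i + 1) (ks.length : Int) 1).filter
        (fun j => PySem.List.pyGetD ks i "" == PySem.List.pyGetD ks j "")).map (fun j => (i, j)))

-- indices at which key c occurs
def pvOcc (ks : List String) (c : String) : List Int :=
  ((PySem.List.enumerate ks 0).filter (fun p => p.2 == c)).map (·.1)

-- B's pair stream: groups in first-occurrence order, per-group pairs in order
def pvCoreR (ks : List String) : List (Int × Int) :=
  (PySem.Set.ofList ks).flatMap (fun c => pvPairs (pvOcc ks c))

-- Pre_ restated on the key list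
def pvPre (ks : List String) : Prop :=
  ∀ j, j < ks.length → ∀ i, i < j → ks.getD i "" = ks.getD j "" → j < 4

lemma pvNorm_default : pvNorm "" = "" := by decide

lemma pvKey_map (options : List String) (i : Int) :
    PySem.List.pyGetD (options.map pvNorm) i "" = pvNorm (PySem.List.pyGetD options i "") := by
  have := PySem.List.pyGetD_map pvNorm options i ""
  rwa [pvNorm_default] at this

lemma pvA_eq (options : List String) :
    detect_duplicate_options options = (pvCoreL (options.map pvNorm)).map pvF := by
  unfold detect_duplicate_options pvCoreL
  simp only [PySem.List.foldl_append_if, PySem.List.foldl_append_eq_flatMap, List.nil_append,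
    List.map_flatMap, List.map_map, pvKey_map, List.length_map]
  rfl

lemma pvEnumerate_map {α β : Type} (f : α → β) (l : List α) (s : Int) :
    PySem.List.enumerate (l.map f) s = (PySem.List.enumerate l s).map (fun p => (p.1, f p.2)) := by
  induction l generalizing s with
  | nil => simp [PySem.List.enumerate]
  | cons x xs ih => simp [PySem.List.enumerate_cons, ih]

lemma pvB_eq (options : List String) :
    detect_duplicate_options_alt options = (pvCoreR (options.map pvNorm)).map pvF := by
  unfold detect_duplicate_options_alt pvCoreR
  simp only [PySem.List.foldl_append_singleton_eq_map, PySem.List.foldl_append_eq_flatMap,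
    List.nil_append]
  have hnodup : ((PySem.List.enumerate options 0).foldl
      (fun d p => d.modify (pvNorm p.2) [] (fun l => l ++ [p.1])) PySem.Dict.empty).keys.Nodup := by
    exact PySem.Dict.nodup_keys_foldl_modify_key (PySem.List.enumerate options 0)
      (fun p => pvNorm p.2) ([] : List Int)
      (fun (_ : PySem.Dict String (List Int)) (p : Int × String) (v : List Int) => v ++ [p.1])
      PySem.Dict.empty (by simp)
  have hkeys : ((PySem.List.enumerate options 0).foldl
      (fun d p => d.modify (pvNorm p.2) [] (fun l => l ++ [p.1])) PySem.Dict.empty).keys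
      = PySem.Set.ofList (options.map pvNorm) := by
    rw [PySem.Dict.keys_foldl_modify_key (PySem.List.enumerate options 0)
      (fun p => pvNorm p.2) ([] : List Int)
      (fun (_ : PySem.Dict String (List Int)) (p : Int × String) (v : List Int) => v ++ [p.1])]
    have : (PySem.List.enumerate options 0).map (fun p => pvNorm p.2)
        = options.map pvNorm := by
      rw [show (fun (p : Int × String) => pvNorm p.2) = pvNorm ∘ (fun p => p.2) from rfl,
        ← List.map_map, PySem.List.map_snd_enumerate]
    rw [this]
    rfl
  have hgetD : ∀ c, ((PySem.List.enumerate options 0).foldl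
      (fun d p => d.modify (pvNorm p.2) [] (fun l => l ++ [p.1])) PySem.Dict.empty).getD c []
      = pvOcc (options.map pvNorm) c := by
    intro c
    have hf : (PySem.List.enumerate options 0).foldl
        (fun d p => d.modify (pvNorm p.2) [] (fun l => l ++ [p.1])) PySem.Dict.empty
        = ((PySem.List.enumerate options 0).map (fun p => (pvNorm p.2, p.1))).foldl
        (fun d q => d.modify q.1 [] (fun l => l ++ [q.2])) PySem.Dict.empty := by
      rw [List.foldl_map]
    rw [hf, PySem.Dict.getD_foldl_modify_append]
    unfold pvOcc
    rw [pvEnumerate_map]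
    simp [List.filter_map, Function.comp_def]
  rw [PySem.Dict.values_eq_map_keys _ hnodup [], hkeys]
  simp only [List.flatMap_map, List.map_flatMap]
  exact List.flatMap_congr (fun c _ => by rw [hgetD c]; rfl)

-- keys disagree across the index-4 boundary: Int-index form
lemma pvPre_int (ks : List String) (h : pvPre ks) (i j : Int) (h0 : 0 ≤ i) (hij : i < j)
    (hj : j < (ks.length : Int)) (h4 : 4 ≤ j) :
    ¬ (PySem.List.pyGetD ks i "" == PySem.List.pyGetD ks j "") := by
  simp only [beq_iff_eq]
  intro heq
  have hjn : j.toNat < ks.length := by omega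
  have hin : i.toNat < j.toNat := by omega
  have := h j.toNat hjn i.toNat hin ?_
  · omega
  · rw [PySem.List.pyGetD_eq_getElem ks "" h0 (by omega),
        PySem.List.pyGetD_eq_getElem ks "" (by omega : (0:Int) ≤ j) (by omega)] at heq
    rw [List.getD_eq_getElem _ _ (by omega), List.getD_eq_getElem _ _ (by omega)]
    exact heq

lemma pvCoreL_take (ks : List String) (h : pvPre ks) : pvCoreL ks = pvCoreL (ks.take 4) := by
  by_cases hn : ks.length ≤ 4
  · rw [List.take_of_length_le hn]
  · have hn' : 4 < ks.length := by omega
    have h4n : (4 : Int) ≤ (ks.length : Int) := by exact_mod_cast hn'.le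
    unfold pvCoreL
    have hlen : ((ks.take 4).length : Int) = 4 := by simp [List.length_take]; omega
    rw [hlen, PySem.List.pyRange_one_append 0 4 (ks.length : Int) (by norm_num) h4n,
      List.flatMap_append]
    have hright : (PySem.List.pyRange 4 (ks.length : Int) 1).flatMap (fun i =>
        ((PySem.List.pyRange (i + 1) (ks.length : Int) 1).filter
          (fun j => PySem.List.pyGetD ks i "" == PySem.List.pyGetD ks j "")).map (fun j => (i, j)))
        = [] := by
      apply List.flatMap_eq_nil_iff.mpr
      intro i hi
      rw [PySem.List.mem_pyRange_one] at hi
      have : (PySem.List.pyRange (i + 1) (ks.length : Int) 1).filter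
          (fun j => PySem.List.pyGetD ks i "" == PySem.List.pyGetD ks j "") = [] := by
        apply List.filter_eq_nil_iff.mpr
        intro j hj
        rw [PySem.List.mem_pyRange_one] at hj
        exact by simpa using pvPre_int ks h i j (by omega) (by omega) (by omega) (by omega)
      rw [this]; rfl
    rw [hright, List.append_nil]
    apply List.flatMap_congr
    intro i hi
    rw [PySem.List.mem_pyRange_one] at hi
    rw [PySem.List.pyRange_one_append (i + 1) 4 (ks.length : Int) (by omega) h4n,
      List.filter_append]
    have hrf : (PySem.List.pyRange 4 (ks.length : Int) 1).filter
        (fun j => PySem.List.pyGetD ks i "" == PySem.List.pyGetD ks j "") = [] := by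
      apply List.filter_eq_nil_iff.mpr
      intro j hj
      rw [PySem.List.mem_pyRange_one] at hj
      exact by simpa using pvPre_int ks h i j (by omega) (by omega) (by omega) (by omega)
    rw [hrf, List.append_nil]
    congr 1
    apply List.filter_congr
    intro j hj
    rw [PySem.List.mem_pyRange_one] at hj
    have hgt : ∀ m : Int, 0 ≤ m → m < 4 → PySem.List.pyGetD (ks.take 4) m "" = PySem.List.pyGetD ks m "" := by
      intro m h0 h4
      rw [PySem.List.pyGetD_eq_getElem (ks.take 4) "" h0 (by rw [hlen]; omega),
          PySem.List.pyGetD_eq_getElem ks "" h0 (by omega)]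
      exact List.getElem_take
    rw [hgt i (by omega) (by omega), hgt j (by omega) (by omega)]

lemma pvPairs_short (l : List Int) (h : l.length ≤ 1) : pvPairs l = [] := by
  match l, h with
  | [], _ => rfl
  | [a], _ => rfl

lemma pvUpdate_disjoint {α : Type} [BEq α] [LawfulBEq α] (r : List α) (s : PySem.Set α)
    (hd : ∀ x ∈ r, x ∉ s) (hnd : r.Nodup) : PySem.Set.update s r = s ++ r := by
  induction r generalizing s with
  | nil => simp [PySem.Set.update_eq_foldl]
  | cons x xs ih =>
    rw [PySem.Set.update_cons, PySem.Set.add_of_not_mem (hd x (by simp))]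
    rw [ih (s ++ [x]) ?_ hnd.of_cons]
    · simp
    · intro y hy
      simp only [List.mem_append, List.mem_singleton]
      rintro (h1 | rfl)
      · exact hd y (by simp [hy]) h1
      · exact (List.nodup_cons.mp hnd).1 hy

lemma pvOcc_length (ks : List String) (c : String) : (pvOcc ks c).length = ks.count c := by
  unfold pvOcc
  rw [List.length_map, ← List.countP_eq_length_filter]
  have : List.countP (fun p => p.2 == c) (PySem.List.enumerate ks 0)
      = List.countP (· == c) ((PySem.List.enumerate ks 0).map (·.2)) := by
    rw [List.countP_map]; rfl
  rw [this, PySem.List.map_snd_enumerate, List.count]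

lemma pvOcc_append_notin (t r : List String) (c : String) (hc : c ∉ r) :
    pvOcc (t ++ r) c = pvOcc t c := by
  unfold pvOcc
  rw [PySem.List.enumerate_append, List.filter_append]
  have : (PySem.List.enumerate r (0 + t.length)).filter (fun p => p.2 == c) = [] := by
    apply List.filter_eq_nil_iff.mpr
    intro p hp
    rw [PySem.List.mem_enumerate_iff] at hp
    obtain ⟨k, hk, rfl⟩ := hp
    simp only [beq_iff_eq]
    intro heq
    exact hc (heq ▸ List.getElem_mem hk)
  rw [this, List.append_nil]

lemma pvCoreR_take (ks : List String) (h : pvPre ks) : pvCoreR ks = pvCoreR (ks.take 4) := by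
  by_cases hn : ks.length ≤ 4
  · rw [List.take_of_length_le hn]
  · have hn' : 4 < ks.length := by omega
    have honce : ∀ (m1 m2 : Nat) (hm1 : m1 < ks.length) (hm2 : m2 < ks.length),
        m1 < m2 → 4 ≤ m2 → ks[m1] ≠ ks[m2] := by
      intro m1 m2 hm1 hm2 h12 h4 heq
      have := h m2 hm2 m1 h12 (by rw [List.getD_eq_getElem _ _ hm1, List.getD_eq_getElem _ _ hm2]; exact heq)
      omega
    have hdisj : ∀ x ∈ ks.drop 4, x ∉ PySem.Set.ofList (ks.take 4) := by
      intro x hx hmem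
      rw [PySem.Set.mem_ofList] at hmem
      obtain ⟨i, hi, hxi⟩ := List.mem_iff_getElem.mp hx
      obtain ⟨m, hm, hxm⟩ := List.mem_iff_getElem.mp hmem
      rw [List.getElem_drop] at hxi
      rw [List.getElem_take] at hxm
      rw [List.length_take] at hm
      rw [List.length_drop] at hi
      exact honce m (4 + i) (by omega) (by omega) (by omega) (by omega) (by rw [hxm, hxi])
    have hndr : (ks.drop 4).Nodup := by
      rw [List.Nodup, List.pairwise_iff_getElem]
      intro i j hi hj hij
      rw [List.getElem_drop, List.getElem_drop]
      rw [List.length_drop] at hi hj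
      exact honce (4 + i) (4 + j) (by omega) (by omega) (by omega) (by omega)
    have hset : PySem.Set.ofList ks = PySem.Set.ofList (ks.take 4) ++ ks.drop 4 := by
      conv_lhs => rw [← List.take_append_drop 4 ks]
      rw [PySem.Set.ofList_append, pvUpdate_disjoint _ _ hdisj hndr]
    unfold pvCoreR
    rw [hset, List.flatMap_append]
    have hright : (ks.drop 4).flatMap (fun c => pvPairs (pvOcc ks c)) = [] := by
      apply List.flatMap_eq_nil_iff.mpr
      intro c hc
      apply pvPairs_short
      rw [pvOcc_length]
      have h1 : ks.count c = (ks.take 4).count c + (ks.drop 4).count c := by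
        conv_lhs => rw [← List.take_append_drop 4 ks]
        rw [List.count_append]
      have h2 : (ks.take 4).count c = 0 := by
        rw [List.count_eq_zero]
        intro hmem
        exact hdisj c hc (by rw [PySem.Set.mem_ofList]; exact hmem)
      have h3 : (ks.drop 4).count c = 1 := List.count_eq_one_of_mem hndr hc
      omega
    rw [hright, List.append_nil]
    apply List.flatMap_congr
    intro c hc
    rw [PySem.Set.mem_ofList] at hc
    have hcr : c ∉ ks.drop 4 := by
      intro hcd
      exact hdisj c hcd (by rw [PySem.Set.mem_ofList]; exact hc)
    congr 1
    conv_lhs => rw [← List.take_append_drop 4 ks]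
    exact pvOcc_append_notin _ _ _ hcr

lemma pvCore_small (ks : List String) (h : ks.length ≤ 4) : pvCoreL ks = pvCoreR ks := by
  match ks with
  | [] => rfl
  | [a] =>
    simp [pvCoreL, pvCoreR, pvOcc, pvPairs,
      show PySem.List.pyRange 0 1 1 = [0] from by decide,
      show PySem.List.pyRange 1 1 1 = [] from by decide,
      PySem.List.pyGetD_ofNat', PySem.List.enumerate_cons, PySem.List.enumerate_nil,
      PySem.Set.ofList_eq_foldl, PySem.Set.add]
  | [a, b] =>
    by_cases hab : a = b <;>
    simp_all [pvCoreL, pvCoreR, pvOcc, pvPairs,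
      show PySem.List.pyRange 0 2 1 = [0, 1] from by decide,
      show PySem.List.pyRange 1 2 1 = [1] from by decide,
      show PySem.List.pyRange 2 2 1 = [] from by decide,
      PySem.List.pyGetD_ofNat', PySem.List.enumerate_cons, PySem.List.enumerate_nil,
      PySem.Set.ofList_eq_foldl, PySem.Set.add,
      show (b = a) ↔ (a = b) from eq_comm]
  | [a, b, c] =>
    by_cases hab : a = b <;> by_cases hac : a = c <;> by_cases hbc : b = c <;>
    simp_all [pvCoreL, pvCoreR, pvOcc, pvPairs,
      show PySem.List.pyRange 0 3 1 = [0, 1, 2] from by decide,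
      show PySem.List.pyRange 1 3 1 = [1, 2] from by decide,
      show PySem.List.pyRange 2 3 1 = [2] from by decide,
      show PySem.List.pyRange 3 3 1 = [] from by decide,
      PySem.List.pyGetD_ofNat', PySem.List.enumerate_cons, PySem.List.enumerate_nil,
      PySem.Set.ofList_eq_foldl, PySem.Set.add,
      show (b = a) ↔ (a = b) from eq_comm, show (c = a) ↔ (a = c) from eq_comm,
      show (c = b) ↔ (b = c) from eq_comm]
  | [a, b, c, d] =>
    by_cases hab : a = b <;> by_cases hac : a = c <;> by_cases had : a = d <;>
    by_cases hbc : b = c <;> by_cases hbd : b = d <;> by_cases hcd : c = d <;>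
    simp_all [pvCoreL, pvCoreR, pvOcc, pvPairs,
      show PySem.List.pyRange 0 4 1 = [0, 1, 2, 3] from by decide,
      show PySem.List.pyRange 1 4 1 = [1, 2, 3] from by decide,
      show PySem.List.pyRange 2 4 1 = [2, 3] from by decide,
      show PySem.List.pyRange 3 4 1 = [3] from by decide,
      show PySem.List.pyRange 4 4 1 = [] from by decide,
      PySem.List.pyGetD_ofNat', PySem.List.enumerate_cons, PySem.List.enumerate_nil,
      PySem.Set.ofList_eq_foldl, PySem.Set.add,
      show (b = a) ↔ (a = b) from eq_comm, show (c = a) ↔ (a = c) from eq_comm,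
      show (c = b) ↔ (b = c) from eq_comm, show (d = a) ↔ (a = d) from eq_comm,
      show (d = b) ↔ (b = d) from eq_comm, show (d = c) ↔ (c = d) from eq_comm]
  | _ :: _ :: _ :: _ :: _ :: _ => simp at h; omega

lemma pvPre_map (options : List String) (h : Pre_detect_duplicate_options options) :
    pvPre (options.map pvNorm) := by
  intro j hj i hij heq
  rw [List.length_map] at hj
  have e : ∀ m, m < options.length →
      (options.map pvNorm).getD m "" = pvNorm (options.getD m "") := by
    intro m hm
    rw [List.getD_eq_getElem _ _ (by simpa using hm), List.getD_eq_getElem _ _ hm,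
      List.getElem_map]
  rw [e i (by omega), e j hj] at heq
  exact h j hj i hij heq

-- ===== VERDICT (by name: the statement is the Claim_ definition above) =====
theorem detect_duplicate_options_spec : Claim_equal_detect_duplicate_options := by
  intro options _ hpre
  unfold Spec_detect_duplicate_options
  have hk := pvPre_map options hpre
  rw [pvA_eq, pvB_eq, pvCoreL_take _ hk, pvCoreR_take _ hk,
      pvCore_small _ (by simp)]
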